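-- pv_equiv track=rewrite | github.com/Shadow15510/IDK | idk/asci.py | text_formater
-- ===== SOURCE A (Python) =====
-- SCREEN_WIDTH = 21
--
-- SCREEN_HEIGHT = 7
--
-- def text_formater(string):
--     screen_displayable_height = SCREEN_HEIGHT - 1
--
--     def line_formater(string):
--         string_result = ""
--         while len(string) > SCREEN_WIDTH:
--             stop_index = SCREEN_WIDTH
--             while stop_index > 0 and not string[stop_index].isspace(): stop_index -= 1
--             if not stop_index: stop_index = SCREEN_WIDTH
--
--             string_result += string[:stop_index].strip() + "\n"
--             string = string[stop_index:].strip()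
--
--         return string_result + string
--
--     def paragraph_formater(lines):
--         paragraphs = ""
--         while len(lines) >= screen_displayable_height:
--             paragraphs += "\n".join(lines[:screen_displayable_height]) + "\n\n"
--             lines = lines[screen_displayable_height:]
--
--         return paragraphs + "\n".join(lines)
--
--     lines = []
--     for line in string.split("\n"):
--         for formated_line in line_formater(line).split("\n"):
--             lines.append(formated_line)
--
--     return paragraph_formater(lines).split("\n\n")
-- ===== SOURCE B (Python) =====
-- SCREEN_WIDTH = 21
--
-- SCREEN_HEIGHT = 7
--
-- def text_formater(string):
--     per_page = SCREEN_HEIGHT - 1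
--     lines = []
--     for line in string.split("\n"):
--         i, j = 0, len(line)  # current remainder of the line is line[i:j]
--         while j - i > SCREEN_WIDTH:
--             stop = SCREEN_WIDTH
--             while stop > 0 and not line[i + stop].isspace():
--                 stop -= 1
--             if stop == 0:
--                 stop = SCREEN_WIDTH
--             lines.append(line[i:i + stop].strip())
--             i += stop
--             while i < j and line[i].isspace():  # lstrip the remainder in place
--                 i += 1
--             while j > i and line[j - 1].isspace():  # rstrip the remainder in place
--                 j -= 1
--         lines.append(line[i:j])
--     n = len(lines)
--     full = n // per_page
--     parts = ["\n".join(lines[per_page * q:per_page * q + per_page]) for q in range(full)]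
--     parts.append("\n".join(lines[per_page * full:]))
--     return "\n\n".join(parts).split("\n\n")
-- ===== Notes on version B (the rewrite author's own statement) =====
-- stated objective: faster
-- what changed: B wraps each line with index pointers into the original string (no repeated slicing and re-stripping of the shrinking remainder), collects wrapped lines directly in a list, and paginates with a chunk comprehension and single joins instead of repeated string concatenation.
import Mathlib
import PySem

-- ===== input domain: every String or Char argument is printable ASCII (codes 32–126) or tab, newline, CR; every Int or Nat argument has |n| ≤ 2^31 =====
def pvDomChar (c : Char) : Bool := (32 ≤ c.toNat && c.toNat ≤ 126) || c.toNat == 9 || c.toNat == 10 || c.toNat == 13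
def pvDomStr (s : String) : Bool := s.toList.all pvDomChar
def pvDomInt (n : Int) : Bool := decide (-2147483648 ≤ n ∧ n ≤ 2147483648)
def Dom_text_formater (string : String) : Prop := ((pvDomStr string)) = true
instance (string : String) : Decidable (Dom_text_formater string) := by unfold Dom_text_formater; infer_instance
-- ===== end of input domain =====

-- B wraps each line with index pointers into the original string and paginates by chunk
-- comprehension + single joins, instead of A's repeated slicing/stripping of a shrinking
-- remainder and repeated string concatenation (objective: faster, measured).

-- A's `if not stop_index: stop_index = SCREEN_WIDTH` (needed by termination proofs)
def stopOfA (s0 : Nat) : Nat := if s0 = 0 then 21 else s0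

theorem stopOfA_pos (s0 : Nat) : 0 < stopOfA s0 := by unfold stopOfA; split <;> omega

-- B's `if stop == 0: stop = SCREEN_WIDTH` (needed by termination proofs)
def stopOfB (s0 : Nat) : Nat := if s0 = 0 then 21 else s0

theorem stopOfB_pos (s0 : Nat) : 0 < stopOfB s0 := by unfold stopOfB; split <;> omega

-- needed by the termination proofs of the ports below
theorem strip_length_le (s : List Char) : (PySem.Chars.strip s).length ≤ s.length := by
  simp only [PySem.Chars.strip, PySem.Chars.rstrip, PySem.Chars.lstrip, List.length_reverse]
  calc (List.dropWhile PySem.Chars.isspace (List.dropWhile PySem.Chars.isspace s).reverse).length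
      ≤ (List.dropWhile PySem.Chars.isspace s).reverse.length := List.length_dropWhile_le _ _
    _ ≤ s.length := by simpa using List.length_dropWhile_le PySem.Chars.isspace s

-- ===== PORT A =====
-- inner `while stop_index > 0 and not string[stop_index].isspace(): stop_index -= 1`
-- (the index is always in range in A; the `getD` default 'x' is never read)
def stopScanA (r : List Char) : Nat → Nat
  | 0 => 0
  | k + 1 =>
    if ¬ PySem.Chars.isspace (r.getD (k + 1) 'x') then stopScanA r k else k + 1

-- `line_formater`: string_result is the accumulator `acc`; s[:k] / s[k:] on the Nat k are
-- List.take / List.drop (= PySem.List.slice_to_natCast / slice_from_natCast)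
def lineFormaterA (acc : List Char) (s : List Char) : List Char :=
  if 21 < s.length then
    let stop := stopOfA (stopScanA s 21)
    lineFormaterA (acc ++ PySem.Chars.strip (s.take stop) ++ ['\n'])
      (PySem.Chars.strip (s.drop stop))
  else acc ++ s
termination_by s.length
decreasing_by
  have h1 := strip_length_le (s.drop (stopOfA (stopScanA s 21)))
  have h2 := stopOfA_pos (stopScanA s 21)
  simp only [List.length_drop] at h1
  omega

-- `paragraph_formater`: paragraphs is the accumulator `acc`
def paragraphFormaterA (acc : List Char) (lines : List (List Char)) : List Char :=
  if 6 ≤ lines.length then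
    paragraphFormaterA (acc ++ PySem.Chars.join ['\n'] (lines.take 6) ++ ['\n', '\n'])
      (lines.drop 6)
  else acc ++ PySem.Chars.join ['\n'] lines
termination_by lines.length
decreasing_by simp only [List.length_drop]; omega

def text_formater (string : String) : List String :=
  let lines := (PySem.Chars.splitOn string.toList ['\n']).foldl
    (fun acc line => acc ++ PySem.Chars.splitOn (lineFormaterA [] line) ['\n']) []
  (PySem.Chars.splitOn (paragraphFormaterA [] lines) ['\n', '\n']).map String.ofList

-- ===== PORT B =====
-- inner `while stop > 0 and not line[i + stop].isspace(): stop -= 1`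
def stopScanB (line : List Char) (i : Nat) : Nat → Nat
  | 0 => 0
  | k + 1 =>
    if ¬ PySem.Chars.isspace (line.getD (i + (k + 1)) 'x') then stopScanB line i k else k + 1

-- `while i < j and line[i].isspace(): i += 1`
def skipWsB (line : List Char) (i j : Nat) : Nat :=
  if i < j ∧ PySem.Chars.isspace (line.getD i 'x') then skipWsB line (i + 1) j else i
termination_by j - i

-- `while j > i and line[j - 1].isspace(): j -= 1`
def trimWsB (line : List Char) (i j : Nat) : Nat :=
  if i < j ∧ PySem.Chars.isspace (line.getD (j - 1) 'x') then trimWsB line i (j - 1) else j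
termination_by j

-- needed by the termination proof of wrapB below
theorem skipWsB_ge (line : List Char) (i j : Nat) : i ≤ skipWsB line i j := by
  unfold skipWsB
  split
  · exact le_trans (by omega) (skipWsB_ge line (i + 1) j)
  · exact le_refl i
termination_by j - i
decreasing_by omega

theorem trimWsB_le (line : List Char) (i j : Nat) : trimWsB line i j ≤ j := by
  unfold trimWsB
  split
  · exact le_trans (trimWsB_le line i (j - 1)) (by omega)
  · exact le_refl j
termination_by j

-- the wrapping loop of B: `lines` is the accumulator `acc`, the remainder is line[i:j]
def wrapB (line : List Char) (i j : Nat) (acc : List (List Char)) : List (List Char) :=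
  if 21 < j - i then
    let stop := stopOfB (stopScanB line i 21)
    let acc' := acc ++ [PySem.Chars.strip ((line.drop i).take stop)]
    let i' := skipWsB line (i + stop) j
    let j' := trimWsB line i' j
    wrapB line i' j' acc'
  else acc ++ [(line.drop i).take (j - i)]
termination_by j - i
decreasing_by
  have h1 := skipWsB_ge line (i + stopOfB (stopScanB line i 21)) j
  have h2 := trimWsB_le line (skipWsB line (i + stopOfB (stopScanB line i 21)) j) j
  have h3 := stopOfB_pos (stopScanB line i 21)
  omega

-- `range(full)` over a Nat bound is List.range; lines[a:b] on Nat bounds is drop/take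
-- (PySem.List.slice_natCast_add)
def text_formater_alt (string : String) : List String :=
  let lines := (PySem.Chars.splitOn string.toList ['\n']).foldl
    (fun acc line => wrapB line 0 line.length acc) []
  let n := lines.length
  let full := n / 6
  let parts := (List.range full).map
      (fun q => PySem.Chars.join ['\n'] ((lines.drop (6 * q)).take 6))
    ++ [PySem.Chars.join ['\n'] (lines.drop (6 * full))]
  (PySem.Chars.splitOn (PySem.Chars.join ['\n', '\n'] parts) ['\n', '\n']).map String.ofList

-- ===== PRECONDITION & SPEC =====
def Spec_text_formater (string : String) (out : List String) : Prop := out = text_formater_alt string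
instance (string : String) (out : List String) : Decidable (Spec_text_formater string out) := by unfold Spec_text_formater; infer_instance

-- ===== CLAIM (what is proved, stated in full; the proofs are below) =====
def Claim_equal_text_formater : Prop := ∀ (string : String), Dom_text_formater string → Spec_text_formater string (text_formater string)

-- ===== LEMMAS AND PROOFS =====

-- characterisation of PySem.Chars.splitOn with a single-character separator
def splitCAux (c : Char) (pre : List Char) : List Char → List (List Char)
  | [] => [pre]
  | d :: rest => if d = c then pre :: splitCAux c [] rest else splitCAux c (pre ++ [d]) rest

theorem splitOn_go_eq (c : Char) (fuel : Nat) :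
    ∀ l cur acc, l.length < fuel →
      PySem.Chars.splitOn.go [c] fuel l cur acc = acc.reverse ++ splitCAux c cur.reverse l := by
  induction fuel with
  | zero => intro l cur acc h; omega
  | succ f ih =>
    intro l cur acc h
    match l with
    | [] =>
      rw [PySem.Chars.splitOn.go.eq_def]
      simp [splitCAux]
    | d :: rest =>
      rw [PySem.Chars.splitOn.go.eq_def]
      simp only [List.isPrefixOf, Bool.and_true]
      by_cases hd : c = d
      · subst hd
        simp only [BEq.rfl, if_pos, List.length_cons, List.length_nil, List.drop_succ_cons,
          List.drop_zero]
        rw [ih rest [] (cur.reverse :: acc) (by simp at h; omega)]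
        simp [splitCAux]
      · have hbe : (c == d) = false := beq_false_of_ne hd
        simp only [hbe, Bool.false_eq_true, if_false]
        rw [ih rest (d :: cur) acc (by simp at h ⊢; omega)]
        simp [splitCAux, Ne.symm hd]

theorem splitOn_single (s : List Char) (c : Char) :
    PySem.Chars.splitOn s [c] = splitCAux c [] s := by
  rw [PySem.Chars.splitOn]
  rw [splitOn_go_eq c (s.length + 1) s [] [] (by omega)]
  simp

theorem splitCAux_of_not_mem (c : Char) (l : List Char) :
    ∀ pre, c ∉ l → splitCAux c pre l = [pre ++ l] := by
  induction l with
  | nil => intro pre h; simp [splitCAux]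
  | cons d rest ih =>
    intro pre h
    simp only [List.mem_cons, not_or] at h
    simp [splitCAux, Ne.symm h.1, ih (pre ++ [d]) h.2]

theorem splitOn_single_of_not_mem (s : List Char) (c : Char) (h : c ∉ s) :
    PySem.Chars.splitOn s [c] = [s] := by
  rw [splitOn_single, splitCAux_of_not_mem c s [] h]
  simp

theorem splitCAux_append (c : Char) (a : List Char) :
    ∀ pre b, c ∉ a → splitCAux c pre (a ++ c :: b) = (pre ++ a) :: splitCAux c [] b := by
  induction a with
  | nil => intro pre b h; simp [splitCAux]
  | cons d rest ih =>
    intro pre b h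
    simp only [List.mem_cons, not_or] at h
    simp [splitCAux, Ne.symm h.1, ih (pre ++ [d]) b h.2]

theorem splitOn_single_append (a b : List Char) (c : Char) (h : c ∉ a) :
    PySem.Chars.splitOn (a ++ c :: b) [c] = a :: PySem.Chars.splitOn b [c] := by
  rw [splitOn_single, splitOn_single, splitCAux_append c a [] b h]
  simp

theorem not_mem_of_mem_splitCAux (c : Char) (l : List Char) :
    ∀ pre p, c ∉ pre → p ∈ splitCAux c pre l → c ∉ p := by
  induction l with
  | nil => intro pre p hpre hp; simp [splitCAux] at hp; subst hp; exact hpre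
  | cons d rest ih =>
    intro pre p hpre hp
    by_cases hd : d = c
    · subst hd
      simp only [splitCAux, if_pos] at hp
      rw [List.mem_cons] at hp
      rcases hp with rfl | hp
      · exact hpre
      · exact ih [] p (by simp) hp
    · simp only [splitCAux, if_neg hd] at hp
      refine ih (pre ++ [d]) p ?_ hp
      simp only [List.mem_append, List.mem_singleton, not_or]
      exact ⟨hpre, fun h => hd h.symm⟩

theorem not_mem_of_mem_splitOn_single (s p : List Char) (c : Char)
    (h : p ∈ PySem.Chars.splitOn s [c]) : c ∉ p := by
  rw [splitOn_single] at h
  exact not_mem_of_mem_splitCAux c s [] p (by simp) h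

theorem mem_of_mem_strip {x : Char} {s : List Char} (h : x ∈ PySem.Chars.strip s) : x ∈ s := by
  simp only [PySem.Chars.strip, PySem.Chars.rstrip, PySem.Chars.lstrip, List.mem_reverse] at h
  have h1 := (List.dropWhile_sublist (l := (List.dropWhile PySem.Chars.isspace s).reverse)
    (p := PySem.Chars.isspace)).mem h
  rw [List.mem_reverse] at h1
  exact (List.dropWhile_sublist (l := s) (p := PySem.Chars.isspace)).mem h1

-- the common spine of both wrapping loops, on the current remainder
def wrapRem (r : List Char) : List (List Char) :=
  if 21 < r.length then
    PySem.Chars.strip (r.take (stopOfA (stopScanA r 21))) ::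
      wrapRem (PySem.Chars.strip (r.drop (stopOfA (stopScanA r 21))))
  else [r]
termination_by r.length
decreasing_by
  have h1 := strip_length_le (r.drop (stopOfA (stopScanA r 21)))
  have h2 := stopOfA_pos (stopScanA r 21)
  simp only [List.length_drop] at h1
  omega

-- A side: the accumulator comes out front
theorem lineFormaterA_acc_aux (n : Nat) : ∀ s : List Char, s.length ≤ n → ∀ acc,
    lineFormaterA acc s = acc ++ lineFormaterA [] s := by
  induction n with
  | zero =>
    intro s hs acc
    have h : ¬ 21 < s.length := by omega
    conv_lhs => rw [lineFormaterA]
    conv_rhs => rw [lineFormaterA]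
    simp [h]
  | succ n ih =>
    intro s hs acc
    by_cases h : 21 < s.length
    · conv_lhs => rw [lineFormaterA]
      conv_rhs => rw [lineFormaterA]
      simp only [if_pos h]
      have hlen : (PySem.Chars.strip (s.drop (stopOfA (stopScanA s 21)))).length ≤ n := by
        have h1 := strip_length_le (s.drop (stopOfA (stopScanA s 21)))
        have h2 := stopOfA_pos (stopScanA s 21)
        simp only [List.length_drop] at h1
        omega
      rw [ih _ hlen, ih _ hlen (acc := [] ++ PySem.Chars.strip (s.take (stopOfA (stopScanA s 21))) ++ ['\n'])]
      simp
    · conv_lhs => rw [lineFormaterA]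
      conv_rhs => rw [lineFormaterA]
      simp [h]

theorem lineFormaterA_acc (s acc : List Char) :
    lineFormaterA acc s = acc ++ lineFormaterA [] s :=
  lineFormaterA_acc_aux s.length s le_rfl acc

theorem lineFormaterA_eq_wrapRem_aux (n : Nat) : ∀ s : List Char, s.length ≤ n → '\n' ∉ s →
    PySem.Chars.splitOn (lineFormaterA [] s) ['\n'] = wrapRem s := by
  induction n with
  | zero =>
    intro s hs hnl
    have h : ¬ 21 < s.length := by omega
    rw [lineFormaterA, wrapRem]
    simp only [if_neg h, List.nil_append]
    exact splitOn_single_of_not_mem s '\n' hnl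
  | succ n ih =>
    intro s hs hnl
    by_cases h : 21 < s.length
    · have hpiece : '\n' ∉ PySem.Chars.strip (s.take (stopOfA (stopScanA s 21))) :=
        fun hm => hnl ((s.take_sublist _).mem (mem_of_mem_strip hm))
      have hrest : '\n' ∉ PySem.Chars.strip (s.drop (stopOfA (stopScanA s 21))) :=
        fun hm => hnl ((s.drop_sublist _).mem (mem_of_mem_strip hm))
      have hlen : (PySem.Chars.strip (s.drop (stopOfA (stopScanA s 21)))).length ≤ n := by
        have h1 := strip_length_le (s.drop (stopOfA (stopScanA s 21)))
        have h2 := stopOfA_pos (stopScanA s 21)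
        simp only [List.length_drop] at h1
        omega
      conv_lhs => rw [lineFormaterA]
      rw [wrapRem]
      simp only [if_pos h, List.nil_append]
      rw [lineFormaterA_acc]
      rw [show (PySem.Chars.strip (s.take (stopOfA (stopScanA s 21))) ++ ['\n']) ++
            lineFormaterA [] (PySem.Chars.strip (s.drop (stopOfA (stopScanA s 21)))) =
          PySem.Chars.strip (s.take (stopOfA (stopScanA s 21))) ++ '\n' ::
            lineFormaterA [] (PySem.Chars.strip (s.drop (stopOfA (stopScanA s 21)))) by simp]
      rw [splitOn_single_append _ _ _ hpiece]
      rw [ih _ hlen hrest]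
    · rw [lineFormaterA, wrapRem]
      simp only [if_neg h, List.nil_append]
      exact splitOn_single_of_not_mem s '\n' hnl

theorem lineFormaterA_eq_wrapRem (s : List Char) (h : '\n' ∉ s) :
    PySem.Chars.splitOn (lineFormaterA [] s) ['\n'] = wrapRem s :=
  lineFormaterA_eq_wrapRem_aux s.length s le_rfl h

-- B side: the pointer loops compute lstrip/rstrip of the remainder slice
theorem stopScanB_eq (ln : List Char) (i j : Nat) (hij : i + 21 < j) (hj : j ≤ ln.length) :
    ∀ k, k ≤ 21 → stopScanB ln i k = stopScanA ((ln.drop i).take (j - i)) k := by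
  intro k
  induction k with
  | zero => intro _; rfl
  | succ k ihk =>
    intro hk
    have hvlen : ((ln.drop i).take (j - i)).length = j - i := by
      simp only [List.length_take, List.length_drop]
      omega
    have hv : ((ln.drop i).take (j - i)).getD (k + 1) 'x' = ln.getD (i + (k + 1)) 'x' := by
      rw [List.getD_eq_getElem _ _ (by omega : k + 1 < ((ln.drop i).take (j - i)).length),
        List.getD_eq_getElem _ _ (by omega : i + (k + 1) < ln.length)]
      rw [List.getElem_take, List.getElem_drop]
    rw [stopScanB, stopScanA, hv]
    split
    · exact ihk (by omega)
    · rfl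

theorem skipWsB_eq_aux (ln : List Char) (j : Nat) (hj : j ≤ ln.length) (n : Nat) :
    ∀ a, a ≤ j → j - a ≤ n →
    PySem.Chars.lstrip ((ln.drop a).take (j - a)) =
      (ln.drop (skipWsB ln a j)).take (j - skipWsB ln a j) := by
  induction n with
  | zero =>
    intro a ha hn
    have : j = a := by omega
    subst this
    rw [skipWsB]
    simp [PySem.Chars.lstrip]
  | succ n ih =>
    intro a ha hn
    rw [skipWsB]
    by_cases hlt : a < j
    · have hal : a < ln.length := by omega
      have hdrop : ln.drop a = ln[a] :: ln.drop (a + 1) :=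
        List.drop_eq_getElem_cons (by omega)
      have hgd : ln.getD a 'x' = ln[a] := List.getD_eq_getElem ln 'x' (by omega)
      have htake : (ln.drop a).take (j - a) = ln[a] :: (ln.drop (a + 1)).take (j - (a + 1)) := by
        rw [hdrop, show j - a = (j - (a + 1)) + 1 by omega, List.take_succ_cons]
      by_cases hsp : PySem.Chars.isspace (ln.getD a 'x')
      · rw [if_pos ⟨hlt, hsp⟩]
        rw [← ih (a + 1) (by omega) (by omega)]
        rw [htake]
        simp only [PySem.Chars.lstrip]
        rw [List.dropWhile_cons_of_pos (by rw [← hgd]; exact hsp)]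
      · rw [if_neg (by tauto)]
        rw [htake]
        simp only [PySem.Chars.lstrip]
        rw [List.dropWhile_cons_of_neg (by rw [← hgd]; exact hsp)]
    · rw [if_neg (by tauto)]
      have : j - a = 0 := by omega
      rw [this]
      simp [PySem.Chars.lstrip]

theorem skipWsB_eq (ln : List Char) (a j : Nat) (ha : a ≤ j) (hj : j ≤ ln.length) :
    PySem.Chars.lstrip ((ln.drop a).take (j - a)) =
      (ln.drop (skipWsB ln a j)).take (j - skipWsB ln a j) :=
  skipWsB_eq_aux ln j hj (j - a) a ha le_rfl

theorem skipWsB_le (ln : List Char) (a j : Nat) (ha : a ≤ j) : skipWsB ln a j ≤ j := by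
  rw [skipWsB]
  split
  · rename_i h
    exact skipWsB_le ln (a + 1) j (by omega)
  · exact ha
termination_by j - a
decreasing_by omega

theorem trimWsB_ge (ln : List Char) (i j : Nat) (h : i ≤ j) : i ≤ trimWsB ln i j := by
  rw [trimWsB]
  split
  · rename_i hc
    exact trimWsB_ge ln i (j - 1) (by omega)
  · exact h
termination_by j
decreasing_by omega

theorem rstrip_append (xs : List Char) (c : Char) :
    PySem.Chars.rstrip (xs ++ [c]) =
      if PySem.Chars.isspace c then PySem.Chars.rstrip xs else xs ++ [c] := by
  simp only [PySem.Chars.rstrip, List.reverse_append, List.reverse_cons, List.reverse_nil,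
    List.nil_append, List.singleton_append]
  by_cases h : PySem.Chars.isspace c
  · rw [List.dropWhile_cons_of_pos h, if_pos h]
  · rw [List.dropWhile_cons_of_neg h, if_neg h]
    simp

theorem trimWsB_eq_aux (ln : List Char) (i : Nat) (n : Nat) :
    ∀ j, i ≤ j → j ≤ ln.length → j - i ≤ n →
    PySem.Chars.rstrip ((ln.drop i).take (j - i)) =
      (ln.drop i).take (trimWsB ln i j - i) := by
  induction n with
  | zero =>
    intro j hij hj hn
    have : j - i = 0 := by omega
    rw [trimWsB]
    rw [if_neg (by omega)]
    rw [this]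
    simp [PySem.Chars.rstrip]
  | succ n ih =>
    intro j hij hj hn
    rw [trimWsB]
    by_cases hlt : i < j
    · have hjl : j - 1 < ln.length := by omega
      have hgd : ln.getD (j - 1) 'x' = ln[j - 1] :=
        List.getD_eq_getElem ln 'x' (by omega)
      have hsplit : (ln.drop i).take (j - i) =
          (ln.drop i).take (j - 1 - i) ++ [ln[j - 1]] := by
        rw [show j - i = (j - 1 - i) + 1 by omega, List.take_add_one]
        congr 1
        have hdl : j - 1 - i < (ln.drop i).length := by simp; omega
        have : (ln.drop i)[j - 1 - i]? = some (ln.drop i)[j - 1 - i] :=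
          List.getElem?_eq_getElem hdl
        rw [this]
        simp only [List.getElem_drop, Option.toList_some]
        congr 2
        omega
      by_cases hsp : PySem.Chars.isspace (ln.getD (j - 1) 'x')
      · rw [if_pos ⟨hlt, hsp⟩]
        rw [hsplit, rstrip_append, if_pos (by rw [← hgd]; exact hsp)]
        exact ih (j - 1) (by omega) (by omega) (by omega)
      · rw [if_neg (by tauto)]
        rw [hsplit, rstrip_append, if_neg (by rw [← hgd]; exact hsp), ← hsplit]
    · rw [if_neg (by tauto)]
      have : j - i = 0 := by omega
      rw [this]
      simp [PySem.Chars.rstrip]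

theorem trimWsB_eq (ln : List Char) (i j : Nat) (hij : i ≤ j) (hj : j ≤ ln.length) :
    PySem.Chars.rstrip ((ln.drop i).take (j - i)) =
      (ln.drop i).take (trimWsB ln i j - i) :=
  trimWsB_eq_aux ln i (j - i) j hij hj le_rfl

theorem stopScanA_le (r : List Char) (k : Nat) : stopScanA r k ≤ k := by
  induction k with
  | zero => exact le_refl 0
  | succ k ih => rw [stopScanA]; split <;> omega

theorem wrapB_eq_wrapRem_aux (ln : List Char) (n : Nat) :
    ∀ i j acc, i ≤ j → j ≤ ln.length → j - i ≤ n →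
      wrapB ln i j acc = acc ++ wrapRem ((ln.drop i).take (j - i)) := by
  induction n with
  | zero =>
    intro i j acc hij hj hn
    rw [wrapB, wrapRem]
    have hrlen : ((ln.drop i).take (j - i)).length = j - i := by
      simp only [List.length_take, List.length_drop]; omega
    rw [if_neg (by omega), if_neg (by omega)]
  | succ n ih =>
    intro i j acc hij hj hn
    have hrlen : ((ln.drop i).take (j - i)).length = j - i := by
      simp only [List.length_take, List.length_drop]; omega
    by_cases h21 : 21 < j - i
    · rw [wrapB, wrapRem]
      rw [if_pos h21, if_pos (by omega)]
      show wrapB ln (skipWsB ln (i + stopOfB (stopScanB ln i 21)) j)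
          (trimWsB ln (skipWsB ln (i + stopOfB (stopScanB ln i 21)) j) j)
          (acc ++ [PySem.Chars.strip (List.take (stopOfB (stopScanB ln i 21)) (List.drop i ln))]) = _
      have hscan : stopScanA ((ln.drop i).take (j - i)) 21 = stopScanB ln i 21 :=
        (stopScanB_eq ln i j (by omega) hj 21 le_rfl).symm
      rw [hscan]
      rw [show stopOfA = stopOfB from rfl]
      have hstople : stopOfB (stopScanB ln i 21) ≤ 21 := by
        have h1 : stopScanB ln i 21 ≤ 21 := by rw [← hscan]; exact stopScanA_le _ 21
        unfold stopOfB; split <;> omega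
      have hstoppos := stopOfB_pos (stopScanB ln i 21)
      generalize hstop : stopOfB (stopScanB ln i 21) = stop at *
      have hpiece : ((ln.drop i).take (j - i)).take stop = (ln.drop i).take stop := by
        rw [List.take_take]
        congr 1
        omega
      have hrest : ((ln.drop i).take (j - i)).drop stop =
          (ln.drop (i + stop)).take (j - (i + stop)) := by
        rw [List.drop_take, List.drop_drop]
        congr 1
        omega
      have hstrip : PySem.Chars.strip (((ln.drop i).take (j - i)).drop stop) =
          (ln.drop (skipWsB ln (i + stop) j)).take
            (trimWsB ln (skipWsB ln (i + stop) j) j - skipWsB ln (i + stop) j) := by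
        rw [hrest]
        simp only [PySem.Chars.strip]
        rw [skipWsB_eq ln (i + stop) j (by omega) hj]
        exact trimWsB_eq ln (skipWsB ln (i + stop) j) j
          (skipWsB_le ln (i + stop) j (by omega)) hj
      have hi' := skipWsB_ge ln (i + stop) j
      have hi'le := skipWsB_le ln (i + stop) j (by omega)
      have hj'le := trimWsB_le ln (skipWsB ln (i + stop) j) j
      have hj'ge := trimWsB_ge ln (skipWsB ln (i + stop) j) j hi'le
      rw [hpiece, hstrip]
      rw [ih (skipWsB ln (i + stop) j) (trimWsB ln (skipWsB ln (i + stop) j) j) _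
        hj'ge (by omega) (by omega)]
      simp
    · rw [wrapB, wrapRem]
      rw [if_neg h21, if_neg (by omega)]

theorem wrapB_eq_wrapRem (ln : List Char) (i j : Nat) (acc : List (List Char))
    (hij : i ≤ j) (hj : j ≤ ln.length) :
    wrapB ln i j acc = acc ++ wrapRem ((ln.drop i).take (j - i)) :=
  wrapB_eq_wrapRem_aux ln (j - i) i j acc hij hj le_rfl

-- pagination: A's loop equals B's chunk comprehension joined once
theorem paragraphFormaterA_acc_aux (n : Nat) : ∀ lines : List (List Char), lines.length ≤ n →
    ∀ acc, paragraphFormaterA acc lines = acc ++ paragraphFormaterA [] lines := by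
  induction n with
  | zero =>
    intro lines hl acc
    have h : ¬ 6 ≤ lines.length := by omega
    conv_lhs => rw [paragraphFormaterA]
    conv_rhs => rw [paragraphFormaterA]
    simp [h]
  | succ n ih =>
    intro lines hl acc
    by_cases h : 6 ≤ lines.length
    · conv_lhs => rw [paragraphFormaterA]
      conv_rhs => rw [paragraphFormaterA]
      simp only [if_pos h]
      have hlen : (lines.drop 6).length ≤ n := by simp only [List.length_drop]; omega
      rw [ih _ hlen, ih _ hlen (acc := [] ++ PySem.Chars.join ['\n'] (lines.take 6) ++ ['\n', '\n'])]
      simp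
    · conv_lhs => rw [paragraphFormaterA]
      conv_rhs => rw [paragraphFormaterA]
      simp [h]

theorem paragraphFormaterA_acc (lines : List (List Char)) (acc : List Char) :
    paragraphFormaterA acc lines = acc ++ paragraphFormaterA [] lines :=
  paragraphFormaterA_acc_aux lines.length lines le_rfl acc

theorem join2_cons (x : List Char) (ys : List (List Char)) (h : ys ≠ []) :
    PySem.Chars.join ['\n', '\n'] (x :: ys) =
      x ++ ['\n', '\n'] ++ PySem.Chars.join ['\n', '\n'] ys := by
  cases ys with
  | nil => exact absurd rfl h
  | cons b r => exact PySem.Chars.join_cons_cons _ x b r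

theorem paragraphFormaterA_eq_parts_aux (n : Nat) :
    ∀ lines : List (List Char), lines.length ≤ n →
    paragraphFormaterA [] lines =
      PySem.Chars.join ['\n', '\n']
        ((List.range (lines.length / 6)).map
            (fun q => PySem.Chars.join ['\n'] ((lines.drop (6 * q)).take 6))
          ++ [PySem.Chars.join ['\n'] (lines.drop (6 * (lines.length / 6)))]) := by
  induction n with
  | zero =>
    intro lines hl
    have h0 : lines.length = 0 := by omega
    rw [paragraphFormaterA]
    rw [if_neg (by omega)]
    rw [h0]
    simp [PySem.Chars.join_singleton]
  | succ n ih =>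
    intro lines hl
    by_cases h : 6 ≤ lines.length
    · have hdiv : lines.length / 6 = (lines.length - 6) / 6 + 1 := by omega
      conv_lhs => rw [paragraphFormaterA]
      rw [if_pos h, paragraphFormaterA_acc]
      rw [ih (lines.drop 6) (by simp only [List.length_drop]; omega)]
      rw [hdiv, List.range_succ_eq_map, List.map_cons, List.map_map]
      have hmap : (List.range ((lines.drop 6).length / 6)).map
            (fun q => PySem.Chars.join ['\n'] (((lines.drop 6).drop (6 * q)).take 6)) =
          (List.range ((lines.length - 6) / 6)).map
            ((fun q => PySem.Chars.join ['\n'] ((lines.drop (6 * q)).take 6)) ∘ Nat.succ) := by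
        rw [show (lines.drop 6).length / 6 = (lines.length - 6) / 6 by
          simp only [List.length_drop]]
        refine List.map_congr_left (fun q hq => ?_)
        simp only [Function.comp_apply, List.drop_drop]
        rw [show 6 + 6 * q = 6 * q.succ by omega]
      have hrem : (lines.drop 6).drop (6 * ((lines.drop 6).length / 6)) =
          lines.drop (6 * ((lines.length - 6) / 6 + 1)) := by
        rw [List.drop_drop]
        congr 1
        simp only [List.length_drop]
        omega
      rw [hmap, hrem, List.cons_append, join2_cons _ _ (by simp)]
      simp [List.append_assoc]
    · rw [paragraphFormaterA, if_neg h]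
      have hdiv : lines.length / 6 = 0 := by omega
      rw [hdiv]
      simp [PySem.Chars.join_singleton]

theorem paragraphFormaterA_eq_parts (lines : List (List Char)) :
    paragraphFormaterA [] lines =
      PySem.Chars.join ['\n', '\n']
        ((List.range (lines.length / 6)).map
            (fun q => PySem.Chars.join ['\n'] ((lines.drop (6 * q)).take 6))
          ++ [PySem.Chars.join ['\n'] (lines.drop (6 * (lines.length / 6)))]) :=
  paragraphFormaterA_eq_parts_aux lines.length lines le_rfl

-- ===== VERDICT (by name: the statement is the Claim_ definition above) =====
theorem linesAB_eq (string : String) :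
    (PySem.Chars.splitOn string.toList ['\n']).foldl
        (fun acc line => acc ++ PySem.Chars.splitOn (lineFormaterA [] line) ['\n']) [] =
      (PySem.Chars.splitOn string.toList ['\n']).foldl
        (fun acc line => wrapB line 0 line.length acc) [] := by
  refine PySem.List.foldl_congr_mem' _ _ _ _ (fun ln hln acc => ?_)
  have hnl : '\n' ∉ ln := not_mem_of_mem_splitOn_single _ _ _ hln
  rw [lineFormaterA_eq_wrapRem ln hnl]
  rw [wrapB_eq_wrapRem ln 0 ln.length acc (by omega) le_rfl]
  simp

theorem text_formater_spec : Claim_equal_text_formater := by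
  intro string _
  simp only [Spec_text_formater, text_formater, text_formater_alt]
  rw [linesAB_eq]
  rw [paragraphFormaterA_eq_parts]
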